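-- pv_equiv track=rewrite | github.com/norzest/Python_basic | Programmers/2021_KAKAO_BLIND_RECRUITMENT_1.py | solution
-- ===== SOURCE A (Python) =====
-- def solution(new_id):
--     # 1단계 소문자 치환
--     new_id = new_id.lower()
--
--     # 2단계 특정 문자 제거
--     temp = "abcdefghijklmnopqrstuvwxyz0123456789-_."
--     new_id = ''.join(x for x in new_id if x in temp)
--
--     # 3단계 연속된 마침표 제거
--     new_id = ''.join(new_id[x] for x in range(len(new_id))
--                      if not (new_id[x] == new_id[x-1] == '.'))
--
--     # 4단계 처음과 끝의 마침표 제거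
--     new_id = new_id.strip(".")
--
--     # 5단계 빈 문자열일 경우 a 대입
--     new_id = new_id if new_id != '' else 'a'
--
--     # 6단계 길이가 16자 이상일 경우 15로 만들기
--     new_id = new_id if len(new_id) < 16 else new_id[:15].strip(".")
--
--     # 7단계 길이가 2자 이하일 경우, 3이 될 때까지 반복
--     if len(new_id) <= 2:
--         while len(new_id) <= 2:
--             new_id = ''.join([new_id, new_id[-1]])
--
--     return new_id
-- ===== SOURCE B (Python) =====
-- def solution(new_id):
--     # KAKAO id sanitation, idiomatic pipeline built on str.split/str.join:
--     # dot runs, leading and trailing dots are all handled at once by splitting on '.'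
--     # and joining the nonempty segments; padding uses str.ljust.
--     allowed = "abcdefghijklmnopqrstuvwxyz0123456789-_."
--     filtered = ''.join(c for c in new_id.lower() if c in allowed)
--     s = '.'.join(p for p in filtered.split('.') if p) or 'a'
--     if len(s) > 15:
--         s = s[:15].strip('.')
--     return s.ljust(3, s[-1])
-- ===== Notes on version B (the rewrite author's own statement) =====
-- stated objective: idiomatic
-- what changed: A's index-based wraparound dedup of consecutive dots plus a separate strip('.') pass and a while-loop padding are replaced by split('.')/join of the nonempty segments (which collapses dot runs and removes boundary dots in one mechanism) and str.ljust padding.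
import Mathlib
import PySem

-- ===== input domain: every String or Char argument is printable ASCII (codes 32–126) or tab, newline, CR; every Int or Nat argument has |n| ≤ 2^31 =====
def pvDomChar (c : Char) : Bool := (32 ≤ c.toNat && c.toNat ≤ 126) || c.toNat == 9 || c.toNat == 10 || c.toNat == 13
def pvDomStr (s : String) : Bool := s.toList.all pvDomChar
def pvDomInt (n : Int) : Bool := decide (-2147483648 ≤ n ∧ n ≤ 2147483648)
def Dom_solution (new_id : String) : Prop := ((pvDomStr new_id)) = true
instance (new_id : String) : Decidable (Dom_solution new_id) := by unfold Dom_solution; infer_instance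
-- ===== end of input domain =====

-- B replaces A's index-wraparound dedup of dot runs + strip('.') pass + while-loop padding by
-- split('.')/join of the nonempty segments and str.ljust padding; objective: idiomatic.

-- ===== PORT A =====
-- temp = "abcdefghijklmnopqrstuvwxyz0123456789-_."
def tempA : List Char := "abcdefghijklmnopqrstuvwxyz0123456789-_.".toList

-- step 7's while loop; Python's new_id[-1] is ported as pyGetD … (-1) 'a': at every call site the
-- list is nonempty, where pyGetD agrees exactly with Python's new_id[-1]
def padLoopA (s : List Char) : List Char :=
  if s.length ≤ 2 then padLoopA (s ++ [PySem.List.pyGetD s (-1) 'a']) else s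
  termination_by 3 - s.length
  decreasing_by simp; omega

def solution (new_id : String) : String :=
  -- 1단계: new_id.lower()
  let s1 := PySem.Chars.lower new_id.toList
  -- 2단계: ''.join(x for x in new_id if x in temp)
  let s2 := s1.filter (fun x => tempA.contains x)
  -- 3단계: ''.join(new_id[x] for x in range(len(new_id)) if not (new_id[x] == new_id[x-1] == '.'))
  -- (indices are always in range: x in range(len), and x-1 = -1 wraps to the last element, as pyGetD does)
  let s3 := ((PySem.List.pyRange 0 (s2.length : Int) 1).filter
      (fun x => !(PySem.List.pyGetD s2 x ' ' == '.' && PySem.List.pyGetD s2 (x - 1) ' ' == '.'))).map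
      (fun x => PySem.List.pyGetD s2 x ' ')
  -- 4단계: strip(".")
  let s4 := PySem.Chars.stripChars s3 ['.']
  -- 5단계
  let s5 := if s4 = [] then ['a'] else s4
  -- 6단계: new_id if len < 16 else new_id[:15].strip(".")
  let s6 := if s5.length < 16 then s5 else PySem.Chars.stripChars (PySem.List.slice s5 none (some 15)) ['.']
  -- 7단계
  String.ofList (padLoopA s6)

-- ===== PORT B =====
-- allowed = "abcdefghijklmnopqrstuvwxyz0123456789-_."
def allowedB : List Char := "abcdefghijklmnopqrstuvwxyz0123456789-_.".toList

def solution_alt (new_id : String) : String :=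
  -- filtered = ''.join(c for c in new_id.lower() if c in allowed)
  let filtered := (PySem.Chars.lower new_id.toList).filter (fun c => allowedB.contains c)
  -- '.'.join(p for p in filtered.split('.') if p) or 'a'
  let parts := (PySem.Chars.splitOn filtered ['.']).filter (fun p => !p.isEmpty)
  let s0 := PySem.Chars.join ['.'] parts
  let s1 := if s0 = [] then ['a'] else s0
  -- if len(s) > 15: s = s[:15].strip('.')
  let s2 := if 15 < s1.length then PySem.Chars.stripChars (PySem.List.slice s1 none (some 15)) ['.'] else s1
  -- s.ljust(3, s[-1]) = s + s[-1]*(3 - len(s)); s2 is nonempty here, where pyGetD … (-1) is exactly s[-1]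
  String.ofList (s2 ++ List.replicate (3 - s2.length) (PySem.List.pyGetD s2 (-1) 'a'))

-- ===== PRECONDITION & SPEC =====
def Spec_solution (new_id : String) (out : String) : Prop := out = solution_alt new_id
instance (new_id : String) (out : String) : Decidable (Spec_solution new_id out) := by unfold Spec_solution; infer_instance

-- ===== CLAIM (what is proved, stated in full; the proofs are below) =====
def Claim_equal_solution : Prop := ∀ (new_id : String), Dom_solution new_id → Spec_solution new_id (solution new_id)

-- ===== LEMMAS AND PROOFS =====

-- pairwise consecutive-dot dedup, seeded with the previous character (A's step 3 without the wraparound)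
def go (prev : Char) : List Char → List Char
  | [] => []
  | x :: xs => if x == '.' && prev == '.' then go x xs else x :: go x xs

def dedup : List Char → List Char
  | [] => []
  | c :: cs => c :: go c cs

-- strip-collapse normal form: MD false = middle state, MD true = "pending run of dots" state
def MD : Bool → List Char → List Char
  | _, [] => []
  | false, c :: f => if c = '.' then MD true f else c :: MD false f
  | true, c :: f => if c = '.' then MD true f else '.' :: c :: MD false f

def SForm : List Char → List Char
  | [] => []
  | c :: f => if c = '.' then SForm f else c :: MD false f

-- structural model of str.split('.')
def mySplit : List Char → List (List Char)
  | [] => [[]]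
  | c :: f => if c = '.' then [] :: mySplit f else (c :: (mySplit f).headD []) :: (mySplit f).tail

-- rstrip('.') on a list
def rstripDot (s : List Char) : List Char :=
  (List.dropWhile (fun c => List.contains ['.'] c) s.reverse).reverse

theorem pyGetD_neg_one (s : List Char) (d : Char) : PySem.List.pyGetD s (-1) d = s.getLastD d := by
  cases s with
  | nil => simp [PySem.List.pyGetD, PySem.List.pyGet?, PySem.List.pyIdx?]
  | cons a t =>
      simp [PySem.List.pyGetD, PySem.List.pyGet?, PySem.List.pyIdx?]
      rw [List.getLast?_eq_getElem?]
      simp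

theorem idx_go (s : List Char) : ∀ (n k : Nat), s.length ≤ k + 1 + n →
    ((PySem.List.pyRange ((k : Int) + 1) (s.length : Int) 1).filter
      (fun x => !(PySem.List.pyGetD s x ' ' == '.' && PySem.List.pyGetD s (x - 1) ' ' == '.'))).map
      (fun x => PySem.List.pyGetD s x ' ') = go (s.getD k ' ') (s.drop (k + 1)) := by
  intro n
  induction n with
  | zero =>
      intro k hk
      rw [PySem.List.pyRange_one_eq_nil (by exact_mod_cast hk)]
      rw [List.drop_eq_nil_of_le (by omega)]
      simp [go]
  | succ n ih =>
      intro k hk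
      by_cases h : s.length ≤ k + 1
      · rw [PySem.List.pyRange_one_eq_nil (by exact_mod_cast h)]
        rw [List.drop_eq_nil_of_le (by omega)]
        simp [go]
      · have hlt : k + 1 < s.length := by omega
        rw [PySem.List.pyRange_one_cons (by exact_mod_cast hlt)]
        have hcast : ((k : Int) + 1) = ((k + 1 : Nat) : Int) := by push_cast; ring
        have hg1 : PySem.List.pyGetD s ((k : Int) + 1) ' ' = s.getD (k + 1) ' ' := by
          rw [hcast, PySem.List.pyGetD_natCast]
        have hg0 : PySem.List.pyGetD s ((k : Int) + 1 - 1) ' ' = s.getD k ' ' := by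
          have : ((k : Int) + 1 - 1) = ((k : Nat) : Int) := by ring
          rw [this, PySem.List.pyGetD_natCast]
        have hdrop : s.drop (k + 1) = s[k + 1] :: s.drop (k + 1 + 1) :=
          List.drop_eq_getElem_cons hlt
        have hgetD : s.getD (k + 1) ' ' = s[k + 1] := List.getD_eq_getElem s ' ' hlt
        have hIH := ih (k + 1) (by omega)
        simp only [List.filter_cons]
        by_cases hP : PySem.List.pyGetD s ((k:Int)+1) ' ' = '.' ∧ PySem.List.pyGetD s ((k:Int)+1-1) ' ' = '.'
        · rw [if_neg (by intro hcc; rw [hP.1, hP.2] at hcc; simp at hcc)]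
          rw [hdrop]
          show _ = go (s.getD k ' ') (s[k+1] :: s.drop (k+1+1))
          rw [go]
          rw [if_pos (by simp only [Bool.and_eq_true, beq_iff_eq]; exact ⟨by rw [← hgetD, ← hg1]; exact hP.1, by rw [← hg0]; exact hP.2⟩)]
          rw [show ((k:Int)+1+1) = (((k+1 : Nat)):Int)+1 by push_cast; ring]
          rw [hIH, hgetD]
        · rw [if_pos (by rw [Bool.not_eq_true', Bool.eq_false_iff]; intro hct; simp only [Bool.and_eq_true, beq_iff_eq] at hct; exact hP hct)]
          rw [List.map_cons, hdrop]
          show _ = go (s.getD k ' ') (s[k+1] :: s.drop (k+1+1))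
          rw [go]
          rw [if_neg (by intro hcc; simp only [Bool.and_eq_true, beq_iff_eq] at hcc; exact hP ⟨by rw [hg1, hgetD, hcc.1], by rw [hg0, hcc.2]⟩)]
          rw [show ((k:Int)+1+1) = (((k+1 : Nat)):Int)+1 by push_cast; ring]
          rw [hIH, hg1, hgetD]

theorem strip_cons_dot (x : List Char) :
    PySem.Chars.stripChars ('.' :: x) ['.'] = PySem.Chars.stripChars x ['.'] := by
  simp [PySem.Chars.stripChars, List.dropWhile]

-- A's step 3 (index loop with wraparound) equals `dedup` after strip('.'):
-- they can differ only in a dropped leading '.', which strip removes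
theorem a3_strip (f : List Char) :
    PySem.Chars.stripChars
      (((PySem.List.pyRange 0 (f.length : Int) 1).filter
        (fun x => !(PySem.List.pyGetD f x ' ' == '.' && PySem.List.pyGetD f (x - 1) ' ' == '.'))).map
        (fun x => PySem.List.pyGetD f x ' ')) ['.'] =
    PySem.Chars.stripChars (dedup f) ['.'] := by
  cases f with
  | nil => simp [dedup]
  | cons c t =>
      have hlen : (0 : Int) < ((c :: t).length : Int) := by simp
      rw [PySem.List.pyRange_one_cons hlen]
      simp only [List.filter_cons]
      have hg0 : PySem.List.pyGetD (c :: t) 0 ' ' = c := by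
        simp [PySem.List.pyGetD, PySem.List.pyGet?, PySem.List.pyIdx?]
      have hgm1 : PySem.List.pyGetD (c :: t) (0 - 1) ' ' = (c :: t).getLastD ' ' := by
        rw [show ((0 : Int) - 1) = (-1 : Int) by ring, pyGetD_neg_one]
      have htail : ((PySem.List.pyRange (0 + 1) ((c :: t).length : Int) 1).filter
          (fun x => !(PySem.List.pyGetD (c :: t) x ' ' == '.' && PySem.List.pyGetD (c :: t) (x - 1) ' ' == '.'))).map
          (fun x => PySem.List.pyGetD (c :: t) x ' ') = go c t := by
        have := idx_go (c :: t) (c :: t).length 0 (by omega)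
        rw [show (((0 : Nat) : Int) + 1) = ((0 : Int) + 1) by norm_num] at this
        simpa using this
      by_cases hP : c = '.' ∧ (c :: t).getLastD ' ' = '.'
      · rw [if_neg (by intro hcc; rw [hg0, hgm1, hP.2, hP.1] at hcc; simp at hcc)]
        rw [htail, dedup, hP.1]
        exact (strip_cons_dot (go '.' t)).symm
      · rw [if_pos (by rw [Bool.not_eq_true', Bool.eq_false_iff]; intro hct; rw [hg0, hgm1] at hct; simp only [Bool.and_eq_true, beq_iff_eq] at hct; exact hP hct)]
        rw [List.map_cons, htail, hg0, dedup]

theorem go_nondot (c : Char) (hc : c ≠ '.') (f : List Char) : go c f = dedup f := by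
  cases f with
  | nil => rfl
  | cons x r =>
      rw [go, dedup, if_neg (by simp [hc])]

theorem strip_go_dot (f : List Char) :
    PySem.Chars.stripChars (go '.' f) ['.'] = PySem.Chars.stripChars (dedup f) ['.'] := by
  cases f with
  | nil => rfl
  | cons x r =>
      by_cases hx : x = '.'
      · subst hx
        rw [go, if_pos (by simp), dedup, strip_cons_dot]
      · rw [go, if_neg (by simp [hx]), dedup]

theorem rstripDot_cons_dot (x : List Char) :
    rstripDot ('.' :: x) = if rstripDot x = [] then [] else '.' :: rstripDot x := by
  unfold rstripDot
  rw [List.reverse_cons, List.dropWhile_append]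
  by_cases h : (List.dropWhile (fun c => List.contains ['.'] c) x.reverse) = []
  · rw [if_pos (by rw [List.isEmpty_iff]; exact h), if_pos (by rw [h]; rfl)]
    rfl
  · rw [if_neg (by rw [List.isEmpty_iff]; exact h),
      if_neg (by rw [List.reverse_eq_nil_iff]; exact h), List.reverse_append]
    rfl

theorem rstripDot_cons_nondot (c : Char) (hc : c ≠ '.') (x : List Char) :
    rstripDot (c :: x) = c :: rstripDot x := by
  have hpc : List.dropWhile (fun c => List.contains ['.'] c) [c] = [c] := by
    rw [List.dropWhile_cons_of_neg (by simp [hc])]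
  unfold rstripDot
  rw [List.reverse_cons, List.dropWhile_append]
  by_cases h : (List.dropWhile (fun c => List.contains ['.'] c) x.reverse) = []
  · rw [if_pos (by rw [List.isEmpty_iff]; exact h), hpc, h]
    rfl
  · rw [if_neg (by rw [List.isEmpty_iff]; exact h), List.reverse_append]
    rfl

theorem strip_cons_nondot (c : Char) (hc : c ≠ '.') (x : List Char) :
    PySem.Chars.stripChars (c :: x) ['.'] = c :: rstripDot x := by
  show (List.dropWhile _ (List.dropWhile _ (c :: x)).reverse).reverse = _
  rw [List.dropWhile_cons_of_neg (by simp [hc])]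
  exact rstripDot_cons_nondot c hc x

-- joint invariant: rstrip('.') of the collapsed string is the normal form MD
theorem rstrip_dedup_MD (n : Nat) : ∀ (g : List Char), g.length ≤ n →
    rstripDot (dedup g) = MD false g ∧ rstripDot ('.' :: go '.' g) = MD true g := by
  induction n with
  | zero =>
      intro g hg
      have hg0 : g = [] := List.length_eq_zero_iff.mp (by omega)
      subst hg0
      constructor <;> simp [dedup, go, MD, rstripDot, List.dropWhile]
  | succ n ih =>
      intro g hg
      cases g with
      | nil => constructor <;> simp [dedup, go, MD, rstripDot, List.dropWhile]
      | cons c r =>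
          have hr := ih r (by simp at hg; omega)
          by_cases hc : c = '.'
          · subst hc
            constructor
            · rw [dedup, show MD false ('.' :: r) = MD true r from rfl]
              exact hr.2
            · rw [go, if_pos (by simp), show MD true ('.' :: r) = MD true r from rfl]
              exact hr.2
          · constructor
            · rw [dedup, go_nondot c hc, rstripDot_cons_nondot c hc, hr.1,
                show MD false (c :: r) = c :: MD false r from by rw [MD, if_neg hc]]
            · rw [go, if_neg (by simp [hc]), go_nondot c hc, rstripDot_cons_dot,
                rstripDot_cons_nondot c hc, hr.1]
              rw [show MD true (c :: r) = '.' :: c :: MD false r from by rw [MD, if_neg hc]]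
              simp

-- strip('.') of the collapsed string is the normal form SForm
theorem strip_dedup_SForm (n : Nat) : ∀ (f : List Char), f.length ≤ n →
    PySem.Chars.stripChars (dedup f) ['.'] = SForm f := by
  induction n with
  | zero =>
      intro f hf
      have hf0 : f = [] := List.length_eq_zero_iff.mp (by omega)
      subst hf0
      rfl
  | succ n ih =>
      intro f hf
      cases f with
      | nil => rfl
      | cons c r =>
          by_cases hc : c = '.'
          · subst hc
            rw [dedup, strip_cons_dot, strip_go_dot, ih r (by simp at hf; omega),
              show SForm ('.' :: r) = SForm r from by rw [SForm, if_pos rfl]]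
          · rw [dedup, go_nondot c hc, strip_cons_nondot c hc,
              (rstrip_dedup_MD r.length r le_rfl).1,
              show SForm (c :: r) = c :: MD false r from by rw [SForm, if_neg hc]]

-- ---- B side ----

theorem mySplit_ne_nil (f : List Char) : mySplit f ≠ [] := by
  cases f with
  | nil => simp [mySplit]
  | cons c r => rw [mySplit]; split <;> simp

theorem mySplit_eq_head_tail (f : List Char) :
    mySplit f = (mySplit f).headD [] :: (mySplit f).tail := by
  cases h : mySplit f with
  | nil => exact absurd h (mySplit_ne_nil f)
  | cons a l => rfl

-- splitOn.go with enough fuel computes mySplit around the accumulators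
theorem splitOn_go_eq (fuel : Nat) : ∀ (l cur : List Char) (acc : List (List Char)),
    l.length ≤ fuel →
    PySem.Chars.splitOn.go ['.'] fuel l cur acc =
      acc.reverse ++ (cur.reverse ++ (mySplit l).headD []) :: (mySplit l).tail := by
  induction fuel with
  | zero =>
      intro l cur acc hl
      have hl0 : l = [] := List.length_eq_zero_iff.mp (by omega)
      subst hl0
      simp [PySem.Chars.splitOn.go, mySplit]
  | succ fuel ih =>
      intro l cur acc hl
      cases l with
      | nil => simp [PySem.Chars.splitOn.go, mySplit]
      | cons c rest =>
          by_cases hc : c = '.'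
          · subst hc
            rw [show PySem.Chars.splitOn.go ['.'] (fuel+1) ('.' :: rest) cur acc =
                PySem.Chars.splitOn.go ['.'] fuel rest [] (cur.reverse :: acc) from by
              rw [PySem.Chars.splitOn.go]
              rw [if_pos (by simp [List.isPrefixOf])]
              simp]
            rw [ih rest [] (cur.reverse :: acc) (by simp at hl; omega)]
            rw [show mySplit ('.' :: rest) = [] :: mySplit rest from by rw [mySplit, if_pos rfl]]
            rw [mySplit_eq_head_tail rest]
            simp
          · rw [show PySem.Chars.splitOn.go ['.'] (fuel+1) (c :: rest) cur acc =
                PySem.Chars.splitOn.go ['.'] fuel rest (c :: cur) acc from by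
              rw [PySem.Chars.splitOn.go]
              rw [if_neg (by simp [List.isPrefixOf]; exact fun h => hc h.symm)]]
            rw [ih rest (c :: cur) acc (by simp at hl; omega)]
            rw [show mySplit (c :: rest) = (c :: (mySplit rest).headD []) :: (mySplit rest).tail from by
              rw [mySplit, if_neg hc]]
            simp

theorem splitOn_eq_mySplit (f : List Char) : PySem.Chars.splitOn f ['.'] = mySplit f := by
  rw [PySem.Chars.splitOn, splitOn_go_eq (f.length + 1) f [] [] (by omega)]
  simpa using (mySplit_eq_head_tail f).symm

-- '.'.join(a :: L) = a ++ flatMap ('.' :: ·) L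
def dotJoinTail (L : List (List Char)) : List Char := L.flatMap (fun p => '.' :: p)

theorem join_dot_eq (L : List (List Char)) :
    PySem.Chars.join ['.'] L = match L with
      | [] => []
      | a :: L' => a ++ dotJoinTail L' := by
  cases L with
  | nil => rfl
  | cons a L' =>
      induction L' generalizing a with
      | nil => simp [PySem.Chars.join, List.intercalate, dotJoinTail]
      | cons b L'' ih =>
          have : PySem.Chars.join ['.'] (a :: b :: L'') = a ++ '.' :: PySem.Chars.join ['.'] (b :: L'') := by
            simp [PySem.Chars.join, List.intercalate, List.intersperse]
          rw [this, ih b]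
          simp [dotJoinTail]

-- the normal form MD written through mySplit
theorem MD_eq_split (n : Nat) : ∀ (f : List Char), f.length ≤ n →
    MD false f = (mySplit f).headD [] ++ dotJoinTail (((mySplit f).tail).filter (fun p => !p.isEmpty)) ∧
    MD true f = dotJoinTail ((mySplit f).filter (fun p => !p.isEmpty)) := by
  induction n with
  | zero =>
      intro f hf
      have hf0 : f = [] := List.length_eq_zero_iff.mp (by omega)
      subst hf0
      constructor <;> simp [MD, mySplit, dotJoinTail]
  | succ n ih =>
      intro f hf
      cases f with
      | nil => constructor <;> simp [MD, mySplit, dotJoinTail]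
      | cons c r =>
          have hr := ih r (by simp at hf; omega)
          by_cases hc : c = '.'
          · subst hc
            rw [show mySplit ('.' :: r) = [] :: mySplit r from by rw [mySplit, if_pos rfl]]
            constructor
            · rw [show MD false ('.' :: r) = MD true r from rfl, hr.2]
              simp
            · rw [show MD true ('.' :: r) = MD true r from rfl, hr.2]
              simp
          · rw [show mySplit (c :: r) = (c :: (mySplit r).headD []) :: (mySplit r).tail from by
              rw [mySplit, if_neg hc]]
            constructor
            · rw [show MD false (c :: r) = c :: MD false r from by rw [MD, if_neg hc], hr.1]
              simp
            · rw [show MD true (c :: r) = '.' :: c :: MD false r from by rw [MD, if_neg hc], hr.1]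
              simp [dotJoinTail]

-- B's core: join of the nonempty split segments is the normal form SForm
theorem join_split_eq_SForm (f : List Char) :
    PySem.Chars.join ['.'] ((mySplit f).filter (fun p => !p.isEmpty)) = SForm f := by
  cases f with
  | nil => rfl
  | cons c r =>
      by_cases hc : c = '.'
      · subst hc
        rw [show mySplit ('.' :: r) = [] :: mySplit r from by rw [mySplit, if_pos rfl]]
        rw [show SForm ('.' :: r) = SForm r from by rw [SForm, if_pos rfl]]
        rw [List.filter_cons, if_neg (by simp)]
        exact join_split_eq_SForm r
      · rw [show mySplit (c :: r) = (c :: (mySplit r).headD []) :: (mySplit r).tail from by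
          rw [mySplit, if_neg hc]]
        rw [show SForm (c :: r) = c :: MD false r from by rw [SForm, if_neg hc]]
        rw [List.filter_cons, if_pos (by simp), join_dot_eq, (MD_eq_split r.length r le_rfl).1]
        simp
  termination_by f.length
  decreasing_by all_goals simp

theorem padLoop_eq (s : List Char) :
    padLoopA s = s ++ List.replicate (3 - s.length) (PySem.List.pyGetD s (-1) 'a') := by
  match s with
  | [] => simp [padLoopA, pyGetD_neg_one]
  | [a] => simp [padLoopA, pyGetD_neg_one]
  | [a, b] => simp [padLoopA, pyGetD_neg_one]
  | a :: b :: c :: t => rw [padLoopA]; simp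

-- the two cores coincide: A's dedup-then-strip is B's split-filter-join
theorem core_eq (f : List Char) :
    PySem.Chars.stripChars
      (((PySem.List.pyRange 0 (f.length : Int) 1).filter
        (fun x => !(PySem.List.pyGetD f x ' ' == '.' && PySem.List.pyGetD f (x - 1) ' ' == '.'))).map
        (fun x => PySem.List.pyGetD f x ' ')) ['.'] =
    PySem.Chars.join ['.'] ((PySem.Chars.splitOn f ['.']).filter (fun p => !p.isEmpty)) := by
  rw [a3_strip, strip_dedup_SForm f.length f le_rfl, splitOn_eq_mySplit, join_split_eq_SForm]

-- ===== VERDICT (by name: the statement is the Claim_ definition above) =====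
theorem solution_spec : Claim_equal_solution := by
  intro new_id _
  show Spec_solution new_id (solution new_id)
  unfold Spec_solution
  simp only [solution, solution_alt]
  have hallow : (fun c => allowedB.contains c) = (fun x => tempA.contains x) := rfl
  rw [hallow, core_eq, padLoop_eq]
  set J := PySem.Chars.join ['.']
      ((PySem.Chars.splitOn
        ((PySem.Chars.lower new_id.toList).filter fun x => tempA.contains x) ['.']).filter
        (fun p => !p.isEmpty)) with hJ
  set v := if J = [] then ['a'] else J with hv
  by_cases h : 15 < v.length
  · rw [if_neg (by omega), if_pos h]
  · rw [if_pos (by omega), if_neg h]
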